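-- pv_equiv track=rewrite | github.com/Hieu-L/flipflop | program.py | ve_co
-- ===== SOURCE A (Python) =====
-- def conflict_free(argset,atks) :
--     """
--     Return True or False \n
--     argset : a list of arguments | ex : [ 'A' , 'B' ] \n
--     atks : a list of tuples of arguments, representing attacks | ex: [ ('Atk1','Def1') , ('Atk2','Def2') ] \n\n
--     checks if 'argset' is conflict free.
--     """
--
--     for s in argset :
--         for a,d in atks :
--             # if 's' attacks an argument within the set
--             if (s==a) and (d in argset) :
--                 return False
--
--     return True
--
-- def self_defense(argset,atks) :
--     """
--     Return True or False \n
--     argset : a list of arguments | ex : [ 'A' , 'B' ] \n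
--     atks : a list of tuples of arguments, representing attacks | ex: [ ('Atk1','Def1') , ('Atk2','Def2') ] \n\n
--     checks if 'argset' has the self-defense property.
--     """
--
--     for s in argset :
--         for a,d in atks :
--             # if 's' is attacked by a state 'a' ...
--             if s == d :
--                 self_defended = False
--
--                 # ... try to find an argument in 'argset' that attacks 'a ...
--                 for ap,dp in atks :
--                     if (dp == a) and (ap in argset) :
--                         self_defended = True
--                         break
--
--                 # ... and if you can't , argset is not self defensive
--                 if not self_defended :
--                     return False
--
--
--     return True
--
-- def ve_co(args, atks, argset) :
--     """
--     Return True or False \n\n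
--     args : a list of arguments | ex : [ 'A' , 'B' ] \n
--     atks : a list of tuples of arguments, representing attacks | ex: [ ('Atk1','Def1') , ('Atk2','Def2') ] \n
--     argset : a list of all arguments \n\n
--     checks if 'argset' is a complete extension of F.
--     """
--
--     # check if 'argset' is admissible
--     if conflict_free(argset,atks) and self_defense(argset,atks) :
--
--         # check 'argset' is complete
--         for arg in args :
--
--             all_defended = True
--
--             for a,d in atks :
--
--                 # if arg is attacked ...
--                 if arg == d :
--
--                     has_defender = False
--
--                     for ap,dp in atks :
--                         # ... and the attacker is attacked by an argument in 'argset'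
--                         if (dp == a) and (ap in argset) :
--                             has_defender = True
--                             break
--
--                     if not has_defender :
--                         all_defended = False
--                         break
--
--             if all_defended :
--                 if not (arg in argset) :
--                     return False
--
--         return True
--
--     # if not admissible
--     else :
--         return False
-- ===== SOURCE B (Python) =====
-- def ve_co(args, atks, argset):
--     # One pass per check using sets: O(|args| + |argset| + |atks|) expected.
--     s = set(argset)
--     # conflict-free: no attack stays inside the set
--     if any(a in s and d in s for a, d in atks):
--         return False
--     # arguments counter-attacked by the set
--     defeated = {d for a, d in atks if a in s}
--     # self-defense: every attacker of a member must be defeated by the set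
--     if any(d in s and a not in defeated for a, d in atks):
--         return False
--     # arguments with at least one undefeated attacker (not fully defended)
--     undefended = {d for a, d in atks if a not in defeated}
--     # completeness: every fully defended argument must already be in the set
--     return all(arg in s or arg in undefended for arg in args)
-- ===== Notes on version B (the rewrite author's own statement) =====
-- stated objective: faster
-- what changed: Replaces the triple-nested scans (for every argument, rescan all attacks, and for each attack rescan all attacks for a defender, with list membership tests) by three precomputed sets -- argset, the arguments defeated by argset, and the arguments left undefended -- so each check is a single pass with O(1) set lookups.
import Mathlib
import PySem

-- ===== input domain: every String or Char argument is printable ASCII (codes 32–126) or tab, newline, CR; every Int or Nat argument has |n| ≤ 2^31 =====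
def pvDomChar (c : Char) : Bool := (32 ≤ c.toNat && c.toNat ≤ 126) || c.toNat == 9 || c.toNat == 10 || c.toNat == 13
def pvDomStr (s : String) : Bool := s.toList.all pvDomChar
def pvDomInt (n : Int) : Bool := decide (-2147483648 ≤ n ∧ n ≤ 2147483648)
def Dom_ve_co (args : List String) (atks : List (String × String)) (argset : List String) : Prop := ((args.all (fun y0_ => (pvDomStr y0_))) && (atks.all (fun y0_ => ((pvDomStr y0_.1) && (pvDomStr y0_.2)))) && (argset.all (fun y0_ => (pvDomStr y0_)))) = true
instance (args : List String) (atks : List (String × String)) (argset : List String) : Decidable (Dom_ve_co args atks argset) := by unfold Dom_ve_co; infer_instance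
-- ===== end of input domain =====

-- B replaces A's nested rescans with three precomputed sets (argset, defeated, undefended), one pass per check: asymptotically faster.


-- ===== PORT A =====
def conflict_free (argset : List String) (atks : List (String × String)) : Bool :=
  -- loop returning False on the first attack from a set member into the set
  argset.all (fun s => atks.all (fun ad => !(s == ad.1 && argset.contains ad.2)))

def self_defense (argset : List String) (atks : List (String × String)) : Bool :=
  -- loop returning False on the first attacker of a member with no counter-attack from argset
  argset.all (fun s => atks.all (fun ad =>
    if s == ad.2 then atks.any (fun pq => pq.2 == ad.1 && argset.contains pq.1) else true))

def ve_co (args : List String) (atks : List (String × String)) (argset : List String) : Bool :=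
  if conflict_free argset atks && self_defense argset atks then
    args.all (fun arg =>
      let all_defended := atks.all (fun ad =>
        if arg == ad.2 then atks.any (fun pq => pq.2 == ad.1 && argset.contains pq.1) else true)
      if all_defended then argset.contains arg else true)
  else false

-- ===== PORT B =====
def ve_co_alt (args : List String) (atks : List (String × String)) (argset : List String) : Bool :=
  let s := PySem.Set.ofList argset
  if atks.any (fun ad => PySem.Set.contains s ad.1 && PySem.Set.contains s ad.2) then false
  else
    let defeated := PySem.Set.ofList ((atks.filter (fun ad => PySem.Set.contains s ad.1)).map Prod.snd)
    if atks.any (fun ad => PySem.Set.contains s ad.2 && !(PySem.Set.contains defeated ad.1)) then false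
    else
      let undefended := PySem.Set.ofList ((atks.filter (fun ad => !(PySem.Set.contains defeated ad.1))).map Prod.snd)
      args.all (fun arg => PySem.Set.contains s arg || PySem.Set.contains undefended arg)

-- ===== PRECONDITION & SPEC =====
def Spec_ve_co (args : List String) (atks : List (String × String)) (argset : List String) (out : Bool) : Prop := out = ve_co_alt args atks argset
instance (args : List String) (atks : List (String × String)) (argset : List String) (out : Bool) : Decidable (Spec_ve_co args atks argset out) := by unfold Spec_ve_co; infer_instance

-- ===== CLAIM (what is proved, stated in full; the proofs are below) =====
def Claim_equal_ve_co : Prop := ∀ (args : List String) (atks : List (String × String)) (argset : List String), Dom_ve_co args atks argset → Spec_ve_co args atks argset (ve_co args atks argset)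

-- ===== LEMMAS AND PROOFS =====

theorem ve_co_eq_alt (args : List String) (atks : List (String × String)) (argset : List String) :
    ve_co args atks argset = ve_co_alt args atks argset := by
  rw [Bool.eq_iff_iff]
  simp only [ve_co, ve_co_alt, conflict_free, self_defense]
  simp [List.all_eq_true, List.any_eq_true, PySem.Set.mem_ofList, List.mem_filter, List.mem_map]
  constructor
  · rintro ⟨⟨hcf, hsd⟩, hco⟩
    exact ⟨fun a b hab ha hb => (hcf a ha a b hab).elim (fun h => h rfl) (fun h => h hb),
           fun a b hab hb => (hsd b hb a b hab).elim (fun h => (h rfl).elim) id,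
           fun x hx => (hco x hx).symm.imp id id⟩
  · rintro ⟨hcf, hsd, hco⟩
    refine ⟨⟨fun x hx a b hab => ?_, fun x hx a b hab => ?_⟩, fun x hx => ((hco x hx).imp id id).symm⟩
    · by_cases h : x = a
      · subst h; exact Or.inr (fun hb => hcf x b hab hx hb)
      · exact Or.inl h
    · by_cases h : x = b
      · subst h; exact Or.inr (hsd a x hab hx)
      · exact Or.inl h

-- ===== VERDICT (by name: the statement is the Claim_ definition above) =====
theorem ve_co_spec : Claim_equal_ve_co :=
  fun args atks argset _ => ve_co_eq_alt args atks argset
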